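-- pv_equiv track=rewrite | github.com/Rose-Bright/agentic_flow | src/agents/sales_agent.py | _extract_special_requirements
-- ===== SOURCE A (Python) =====
-- from typing import Dict, Any, List, Optional
--
-- def _extract_special_requirements(message_lower: str) -> List[str]:
--     """Extract any special requirements mentioned"""
--     requirements = []
--
--     if any(word in message_lower for word in ["integration", "api", "connect"]):
--         requirements.append("custom_integrations")
--     if any(word in message_lower for word in ["training", "onboarding", "setup"]):
--         requirements.append("training_services")
--     if any(word in message_lower for word in ["migration", "import", "transfer"]):
--         requirements.append("data_migration")
--     if any(word in message_lower for word in ["sla", "guarantee", "uptime"]):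
--         requirements.append("sla_guarantee")
--
--     return requirements
-- ===== SOURCE B (Python) =====
-- # B: single left-to-right scan of the text (multi-pattern matching at each position)
-- # instead of twelve independent substring searches; tags collected in a set, emitted
-- # in the canonical order.
-- KEYWORD_TAG = {
--     "integration": "custom_integrations", "api": "custom_integrations", "connect": "custom_integrations",
--     "training": "training_services", "onboarding": "training_services", "setup": "training_services",
--     "migration": "data_migration", "import": "data_migration", "transfer": "data_migration",
--     "sla": "sla_guarantee", "guarantee": "sla_guarantee", "uptime": "sla_guarantee",
-- }
-- TAG_ORDER = ["custom_integrations", "training_services", "data_migration", "sla_guarantee"]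
--
-- def _extract_special_requirements(message_lower: str):
--     """Extract any special requirements mentioned"""
--     hits = set()
--     for i in range(len(message_lower)):
--         for word, tag in KEYWORD_TAG.items():
--             if message_lower.startswith(word, i):
--                 hits.add(tag)
--     return [tag for tag in TAG_ORDER if tag in hits]
-- ===== Notes on version B (the rewrite author's own statement) =====
-- stated objective: alternative
-- what changed: Replaces four branches each doing independent substring searches with a single left-to-right scan of the message that tests all twelve keywords at each position, accumulating matched tags in a set and emitting them in canonical order.
import Mathlib
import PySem

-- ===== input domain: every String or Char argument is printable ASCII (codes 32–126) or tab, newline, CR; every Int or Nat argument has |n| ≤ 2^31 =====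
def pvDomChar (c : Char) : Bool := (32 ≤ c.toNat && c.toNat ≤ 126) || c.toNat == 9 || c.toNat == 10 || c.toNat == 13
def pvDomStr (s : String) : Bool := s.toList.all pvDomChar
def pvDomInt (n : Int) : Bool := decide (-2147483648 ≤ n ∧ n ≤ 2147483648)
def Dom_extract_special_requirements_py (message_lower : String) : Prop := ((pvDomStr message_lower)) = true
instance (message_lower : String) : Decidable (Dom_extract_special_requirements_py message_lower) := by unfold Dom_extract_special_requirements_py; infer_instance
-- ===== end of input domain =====

-- ===== PORT A =====
-- One honest line: B replaces A's four branches of independent substring searches with a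
-- single left-to-right scan of the message testing every keyword at each position (alternative).
def extract_special_requirements_py (message_lower : String) : List String :=
  let requirements : List String := []
  let requirements := if ["integration", "api", "connect"].any (fun w => PySem.Str.isIn w message_lower) then requirements ++ ["custom_integrations"] else requirements
  let requirements := if ["training", "onboarding", "setup"].any (fun w => PySem.Str.isIn w message_lower) then requirements ++ ["training_services"] else requirements
  let requirements := if ["migration", "import", "transfer"].any (fun w => PySem.Str.isIn w message_lower) then requirements ++ ["data_migration"] else requirements
  let requirements := if ["sla", "guarantee", "uptime"].any (fun w => PySem.Str.isIn w message_lower) then requirements ++ ["sla_guarantee"] else requirements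
  requirements

-- ===== PORT B =====
-- the KEYWORD_TAG dict, in insertion order (keys as char lists: startswith(word, i) is
-- checked exactly as PySem.Chars.startswith on the i-dropped character list)
def pvKeywordTag : List (List Char × String) :=
  [("integration".toList, "custom_integrations"), ("api".toList, "custom_integrations"), ("connect".toList, "custom_integrations"),
   ("training".toList, "training_services"), ("onboarding".toList, "training_services"), ("setup".toList, "training_services"),
   ("migration".toList, "data_migration"), ("import".toList, "data_migration"), ("transfer".toList, "data_migration"),
   ("sla".toList, "sla_guarantee"), ("guarantee".toList, "sla_guarantee"), ("uptime".toList, "sla_guarantee")]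

def pvTagOrder : List String :=
  ["custom_integrations", "training_services", "data_migration", "sla_guarantee"]

def extract_special_requirements_py_alt (message_lower : String) : List String :=
  let cs := message_lower.toList
  let hits : PySem.Set String :=
    (List.range cs.length).foldl
      (fun hits i =>
        pvKeywordTag.foldl
          (fun hits p => if PySem.Chars.startswith (cs.drop i) p.1 then PySem.Set.add hits p.2 else hits)
          hits)
      PySem.Set.empty
  pvTagOrder.filter (fun t => PySem.Set.contains hits t)

-- ===== PRECONDITION & SPEC =====
def Spec_extract_special_requirements_py (message_lower : String) (out : List String) : Prop := out = extract_special_requirements_py_alt message_lower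
instance (message_lower : String) (out : List String) : Decidable (Spec_extract_special_requirements_py message_lower out) := by unfold Spec_extract_special_requirements_py; infer_instance

-- ===== CLAIM (what is proved, stated in full; the proofs are below) =====
def Claim_equal_extract_special_requirements_py : Prop := ∀ (message_lower : String), Dom_extract_special_requirements_py message_lower → Spec_extract_special_requirements_py message_lower (extract_special_requirements_py message_lower)

-- ===== LEMMAS AND PROOFS =====

-- membership after the inner fold over the keyword table
theorem pv_inner_mem (cs : List Char) (i : Nat) (kl : List (List Char × String))
    (s : PySem.Set String) (t : String) :
    t ∈ kl.foldl
        (fun hits p => if PySem.Chars.startswith (cs.drop i) p.1 then PySem.Set.add hits p.2 else hits) s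
      ↔ t ∈ s ∨ ∃ p ∈ kl, PySem.Chars.startswith (cs.drop i) p.1 = true ∧ t = p.2 := by
  induction kl generalizing s with
  | nil => simp
  | cons hd tl ih =>
    simp only [List.foldl_cons, List.mem_cons]
    by_cases h : PySem.Chars.startswith (cs.drop i) hd.1 = true
    · rw [if_pos h, ih]
      simp [PySem.Set.mem_add, h]
      tauto
    · rw [if_neg h, ih]
      simp only [Bool.not_eq_true] at h
      simp [h]

-- membership after the whole scan
theorem pv_scan_mem (cs : List Char) (l : List Nat) (s : PySem.Set String) (t : String) :
    t ∈ l.foldl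
        (fun hits i =>
          pvKeywordTag.foldl
            (fun hits p => if PySem.Chars.startswith (cs.drop i) p.1 then PySem.Set.add hits p.2 else hits)
            hits) s
      ↔ t ∈ s ∨ ∃ i ∈ l, ∃ p ∈ pvKeywordTag, PySem.Chars.startswith (cs.drop i) p.1 = true ∧ t = p.2 := by
  induction l generalizing s with
  | nil => simp
  | cons hd tl ih =>
    simp only [List.foldl_cons, List.mem_cons]
    rw [ih, pv_inner_mem]
    constructor
    · rintro ((hs | ⟨p, hp, hsw, ht⟩) | ⟨i, hi, p, hp, hsw, ht⟩)
      · exact Or.inl hs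
      · exact Or.inr ⟨hd, Or.inl rfl, p, hp, hsw, ht⟩
      · exact Or.inr ⟨i, Or.inr hi, p, hp, hsw, ht⟩
    · rintro (hs | ⟨i, (rfl | hi), p, hp, hsw, ht⟩)
      · exact Or.inl (Or.inl hs)
      · exact Or.inl (Or.inr ⟨p, hp, hsw, ht⟩)
      · exact Or.inr ⟨i, hi, p, hp, hsw, ht⟩

-- a nonempty keyword matches at some scanned position iff it is a substring
theorem pv_pos_iff_isIn (cs : List Char) (w : List Char) (hw : w ≠ []) :
    (∃ i ∈ List.range cs.length, PySem.Chars.startswith (cs.drop i) w = true)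
      ↔ PySem.Chars.isIn w cs = true := by
  rw [← PySem.Chars.exists_prefix_drop_iff_isIn]
  simp only [List.mem_range, PySem.Chars.startswith_iff]
  constructor
  · rintro ⟨i, _, h⟩; exact ⟨i, h⟩
  · rintro ⟨j, hj⟩
    by_cases hjn : j < cs.length
    · exact ⟨j, hjn, hj⟩
    · exfalso
      rw [List.drop_eq_nil_of_le (Nat.le_of_not_lt hjn)] at hj
      exact hw (List.prefix_nil.mp hj)

-- membership in the scan's hit set, characterized by the keyword table
theorem pv_contains (ml : String) (tag : String) :
    PySem.Set.contains
        ((List.range ml.toList.length).foldl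
          (fun hits i =>
            pvKeywordTag.foldl
              (fun hits p => if PySem.Chars.startswith (ml.toList.drop i) p.1 then PySem.Set.add hits p.2 else hits)
              hits) PySem.Set.empty) tag = true
      ↔ ∃ p ∈ pvKeywordTag, p.2 = tag ∧ PySem.Chars.isIn p.1 ml.toList = true := by
  have hne : ∀ p ∈ pvKeywordTag, p.1 ≠ [] := by decide
  rw [PySem.Set.contains_iff, pv_scan_mem]
  simp only [PySem.Set.empty, List.not_mem_nil, false_or]
  constructor
  · rintro ⟨i, hi, p, hp, hsw, rfl⟩
    exact ⟨p, hp, rfl, (pv_pos_iff_isIn ml.toList p.1 (hne p hp)).mp ⟨i, hi, hsw⟩⟩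
  · rintro ⟨p, hp, rfl, hin⟩
    obtain ⟨i, hi, hsw⟩ := (pv_pos_iff_isIn ml.toList p.1 (hne p hp)).mpr hin
    exact ⟨i, hi, p, hp, hsw, rfl⟩

theorem pv_group_1 (ml : String) :
    PySem.Set.contains
        ((List.range ml.toList.length).foldl
          (fun hits i =>
            pvKeywordTag.foldl
              (fun hits p => if PySem.Chars.startswith (ml.toList.drop i) p.1 then PySem.Set.add hits p.2 else hits)
              hits) PySem.Set.empty) "custom_integrations"
      = ["integration", "api", "connect"].any (fun w => PySem.Str.isIn w ml) := by
  rw [Bool.eq_iff_iff, pv_contains]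
  simp [pvKeywordTag, PySem.Str.isIn_eq]

theorem pv_group_2 (ml : String) :
    PySem.Set.contains
        ((List.range ml.toList.length).foldl
          (fun hits i =>
            pvKeywordTag.foldl
              (fun hits p => if PySem.Chars.startswith (ml.toList.drop i) p.1 then PySem.Set.add hits p.2 else hits)
              hits) PySem.Set.empty) "training_services"
      = ["training", "onboarding", "setup"].any (fun w => PySem.Str.isIn w ml) := by
  rw [Bool.eq_iff_iff, pv_contains]
  simp [pvKeywordTag, PySem.Str.isIn_eq]

theorem pv_group_3 (ml : String) :
    PySem.Set.contains
        ((List.range ml.toList.length).foldl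
          (fun hits i =>
            pvKeywordTag.foldl
              (fun hits p => if PySem.Chars.startswith (ml.toList.drop i) p.1 then PySem.Set.add hits p.2 else hits)
              hits) PySem.Set.empty) "data_migration"
      = ["migration", "import", "transfer"].any (fun w => PySem.Str.isIn w ml) := by
  rw [Bool.eq_iff_iff, pv_contains]
  simp [pvKeywordTag, PySem.Str.isIn_eq]

theorem pv_group_4 (ml : String) :
    PySem.Set.contains
        ((List.range ml.toList.length).foldl
          (fun hits i =>
            pvKeywordTag.foldl
              (fun hits p => if PySem.Chars.startswith (ml.toList.drop i) p.1 then PySem.Set.add hits p.2 else hits)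
              hits) PySem.Set.empty) "sla_guarantee"
      = ["sla", "guarantee", "uptime"].any (fun w => PySem.Str.isIn w ml) := by
  rw [Bool.eq_iff_iff, pv_contains]
  simp [pvKeywordTag, PySem.Str.isIn_eq]

-- ===== VERDICT (by name: the statement is the Claim_ definition above) =====
theorem extract_special_requirements_py_spec : Claim_equal_extract_special_requirements_py := by
  intro message_lower _
  unfold Spec_extract_special_requirements_py extract_special_requirements_py
    extract_special_requirements_py_alt pvTagOrder
  simp only [List.filter_cons, List.filter_nil, pv_group_1, pv_group_2, pv_group_3, pv_group_4]
  generalize (["integration", "api", "connect"].any (fun w => PySem.Str.isIn w message_lower)) = c1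
  generalize (["training", "onboarding", "setup"].any (fun w => PySem.Str.isIn w message_lower)) = c2
  generalize (["migration", "import", "transfer"].any (fun w => PySem.Str.isIn w message_lower)) = c3
  generalize (["sla", "guarantee", "uptime"].any (fun w => PySem.Str.isIn w message_lower)) = c4
  cases c1 <;> cases c2 <;> cases c3 <;> cases c4 <;> rfl
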